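-- pv_equiv track=rewrite | github.com/TamirOffen/OptimalChessAgent | GeneticAlgo/GA_training.py | find_positions_array
-- ===== SOURCE A (Python) =====
-- def find_positions_array(board, players_turn):
--   rook_array = []
--   bishops_array = []
--   knights_array = []
--   queen_array = []
--   king_array = []
--   pawns_array = []
--   opponent_pawns_array = []
--   opponent_king_array = []
--   opponent_knights_array = []
--   opponent_bishops_array = []
--   opponent_queen_array = []
--   opponent_rooks_array = []
--
--   if players_turn == 'w':
--     for i, row in enumerate(board):
--       for j, square in enumerate(row):
--         if square == 'R':
--           rook_array.append((i,j))
--         elif square == 'B':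
--           bishops_array.append((i,j))
--         elif square == 'N':
--           knights_array.append((i,j))
--         elif square == 'Q':
--           queen_array.append((i,j))
--         elif square == 'K':
--           king_array.append((i,j))
--         elif square == 'P':
--           pawns_array.append((i,j))
--         elif square == 'p':
--           opponent_pawns_array.append((i,j))
--         elif square == 'k':
--           opponent_king_array.append((i,j))
--         elif square == 'b':
--           opponent_bishops_array.append((i,j))
--         elif square == 'n':
--           opponent_knights_array.append((i,j))
--         elif square == 'q':
--           opponent_queen_array.append((i,j))
--         elif square == 'r':
--           opponent_rooks_array.append((i,j))
--   else:
--     for i, row in enumerate(board):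
--       for j, square in enumerate(row):
--         if square == 'r':
--           rook_array.append((i,j))
--         elif square == 'b':
--           bishops_array.append((i,j))
--         elif square == 'n':
--           knights_array.append((i,j))
--         elif square == 'q':
--           queen_array.append((i,j))
--         elif square == 'k':
--           king_array.append((i,j))
--         elif square == 'p':
--           pawns_array.append((i,j))
--         elif square == 'P':
--           opponent_pawns_array.append((i,j))
--         elif square == 'K':
--           opponent_king_array.append((i,j))
--         elif square == 'B':
--           opponent_bishops_array.append((i,j))
--         elif square == 'N':
--           opponent_knights_array.append((i,j))
--         elif square == 'Q':
--           opponent_queen_array.append((i,j))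
--         elif square == 'R':
--           opponent_rooks_array.append((i,j))
--
--   piece_array = []
--   piece_array.append(rook_array)
--   piece_array.append(bishops_array)
--   piece_array.append(knights_array)
--   piece_array.append(queen_array)
--   piece_array.append(king_array)
--   piece_array.append(pawns_array)
--   piece_array.append(opponent_pawns_array)
--   piece_array.append(opponent_king_array)
--   piece_array.append(opponent_bishops_array)
--   piece_array.append(opponent_knights_array)
--   piece_array.append(opponent_queen_array)
--   piece_array.append(opponent_rooks_array)
--
--   return piece_array
-- ===== SOURCE B (Python) =====
-- def find_positions_array(board, players_turn):
--     order = (['R', 'B', 'N', 'Q', 'K', 'P', 'p', 'k', 'b', 'n', 'q', 'r']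
--              if players_turn == 'w'
--              else ['r', 'b', 'n', 'q', 'k', 'p', 'P', 'K', 'B', 'N', 'Q', 'R'])
--     return [[(i, j) for i, row in enumerate(board) for j, sq in enumerate(row) if sq == c]
--             for c in order]
-- ===== Notes on version B (the rewrite author's own statement) =====
-- stated objective: simpler
-- what changed: Replaced the single classifying pass with twelve mutable accumulator lists and a 12-way elif chain by a per-turn ordered list of the 12 target characters and one row-major comprehension scan per character.
import Mathlib
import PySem

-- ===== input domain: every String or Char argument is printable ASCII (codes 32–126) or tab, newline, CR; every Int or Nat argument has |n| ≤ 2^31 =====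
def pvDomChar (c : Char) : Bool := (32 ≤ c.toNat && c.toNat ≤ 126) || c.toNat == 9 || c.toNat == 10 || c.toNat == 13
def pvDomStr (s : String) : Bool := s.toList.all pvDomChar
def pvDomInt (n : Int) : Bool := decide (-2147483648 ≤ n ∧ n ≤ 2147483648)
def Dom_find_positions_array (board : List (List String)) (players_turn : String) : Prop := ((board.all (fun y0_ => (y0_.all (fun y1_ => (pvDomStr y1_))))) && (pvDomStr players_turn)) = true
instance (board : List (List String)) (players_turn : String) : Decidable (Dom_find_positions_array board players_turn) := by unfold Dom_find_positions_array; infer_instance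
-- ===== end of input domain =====

-- B replaces A's one classifying pass with twelve mutable accumulators by one row-major
-- scan per target character over an ordered 12-character list (simpler; same result).

-- ===== PORT A =====
-- the twelve accumulator lists of A, in A's output order
structure PvSt where
  rook : List (Int × Int)
  bishops : List (Int × Int)
  knights : List (Int × Int)
  queen : List (Int × Int)
  king : List (Int × Int)
  pawns : List (Int × Int)
  opawns : List (Int × Int)
  oking : List (Int × Int)
  obishops : List (Int × Int)
  oknights : List (Int × Int)
  oqueen : List (Int × Int)
  orooks : List (Int × Int)

def pvInit : PvSt := ⟨[], [], [], [], [], [], [], [], [], [], [], []⟩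

def pvStepW (st : PvSt) (i j : Int) (sq : String) : PvSt :=
  if sq = "R" then { st with rook := st.rook ++ [(i, j)] }
  else   if sq = "B" then { st with bishops := st.bishops ++ [(i, j)] }
  else   if sq = "N" then { st with knights := st.knights ++ [(i, j)] }
  else   if sq = "Q" then { st with queen := st.queen ++ [(i, j)] }
  else   if sq = "K" then { st with king := st.king ++ [(i, j)] }
  else   if sq = "P" then { st with pawns := st.pawns ++ [(i, j)] }
  else   if sq = "p" then { st with opawns := st.opawns ++ [(i, j)] }
  else   if sq = "k" then { st with oking := st.oking ++ [(i, j)] }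
  else   if sq = "b" then { st with obishops := st.obishops ++ [(i, j)] }
  else   if sq = "n" then { st with oknights := st.oknights ++ [(i, j)] }
  else   if sq = "q" then { st with oqueen := st.oqueen ++ [(i, j)] }
  else   if sq = "r" then { st with orooks := st.orooks ++ [(i, j)] }
  else st

def pvStepB (st : PvSt) (i j : Int) (sq : String) : PvSt :=
  if sq = "r" then { st with rook := st.rook ++ [(i, j)] }
  else   if sq = "b" then { st with bishops := st.bishops ++ [(i, j)] }
  else   if sq = "n" then { st with knights := st.knights ++ [(i, j)] }
  else   if sq = "q" then { st with queen := st.queen ++ [(i, j)] }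
  else   if sq = "k" then { st with king := st.king ++ [(i, j)] }
  else   if sq = "p" then { st with pawns := st.pawns ++ [(i, j)] }
  else   if sq = "P" then { st with opawns := st.opawns ++ [(i, j)] }
  else   if sq = "K" then { st with oking := st.oking ++ [(i, j)] }
  else   if sq = "B" then { st with obishops := st.obishops ++ [(i, j)] }
  else   if sq = "N" then { st with oknights := st.oknights ++ [(i, j)] }
  else   if sq = "Q" then { st with oqueen := st.oqueen ++ [(i, j)] }
  else   if sq = "R" then { st with orooks := st.orooks ++ [(i, j)] }
  else st

def find_positions_array (board : List (List String)) (players_turn : String) : List (List (Int × Int)) :=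
  let st : PvSt :=
    if players_turn = "w" then
      (PySem.List.enumerate board 0).foldl (fun st pr =>
        (PySem.List.enumerate pr.2 0).foldl (fun st q => pvStepW st pr.1 q.1 q.2) st) pvInit
    else
      (PySem.List.enumerate board 0).foldl (fun st pr =>
        (PySem.List.enumerate pr.2 0).foldl (fun st q => pvStepB st pr.1 q.1 q.2) st) pvInit
  [st.rook, st.bishops, st.knights, st.queen, st.king, st.pawns, st.opawns, st.oking, st.obishops, st.oknights, st.oqueen, st.orooks]

-- ===== PORT B =====
-- [(i,j) for i,row in enumerate(board) for j,sq in enumerate(row) if sq == c]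
def pvCollect (board : List (List String)) (c : String) : List (Int × Int) :=
  (PySem.List.enumerate board 0).flatMap (fun pr =>
    (PySem.List.enumerate pr.2 0).filterMap (fun q => if q.2 = c then some (pr.1, q.1) else none))

def find_positions_array_alt (board : List (List String)) (players_turn : String) : List (List (Int × Int)) :=
  (if players_turn = "w" then
    ["R", "B", "N", "Q", "K", "P", "p", "k", "b", "n", "q", "r"]
  else
    ["r", "b", "n", "q", "k", "p", "P", "K", "B", "N", "Q", "R"]).map (pvCollect board)

-- ===== PRECONDITION & SPEC =====
def Spec_find_positions_array (board : List (List String)) (players_turn : String) (out : List (List (Int × Int))) : Prop := out = find_positions_array_alt board players_turn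
instance (board : List (List String)) (players_turn : String) (out : List (List (Int × Int))) : Decidable (Spec_find_positions_array board players_turn out) := by unfold Spec_find_positions_array; infer_instance

-- ===== CLAIM (what is proved, stated in full; the proofs are below) =====
def Claim_equal_find_positions_array : Prop := ∀ (board : List (List String)) (players_turn : String), Dom_find_positions_array board players_turn → Spec_find_positions_array board players_turn (find_positions_array board players_turn)

-- ===== LEMMAS AND PROOFS =====
-- the board flattened to (i, j, square) cells in row-major order
def pvCells (board : List (List String)) : List (Int × Int × String) :=
  (PySem.List.enumerate board 0).flatMap (fun pr =>
    (PySem.List.enumerate pr.2 0).map (fun q => (pr.1, q.1, q.2)))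

lemma pvCollect_eq_cells (board : List (List String)) (c : String) :
    pvCollect board c
      = (pvCells board).filterMap (fun t => if t.2.2 = c then some (t.1, t.2.1) else none) := by
  simp [pvCollect, pvCells, List.filterMap_flatMap, List.filterMap_map, Function.comp]

lemma pvFoldl_flatMap {α β σ : Type} (g : α → List β) (F : σ → β → σ) (l : List α) (st : σ) :
    (l.flatMap g).foldl F st = l.foldl (fun st a => (g a).foldl F st) st := by
  induction l generalizing st with
  | nil => rfl
  | cons a l ih => simp [List.flatMap_cons, List.foldl_append, ih]

lemma pvNested_eq_cells (step : PvSt → Int → Int → String → PvSt) (board : List (List String)) (st : PvSt) :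
    (PySem.List.enumerate board 0).foldl (fun st pr =>
        (PySem.List.enumerate pr.2 0).foldl (fun st q => step st pr.1 q.1 q.2) st) st
      = (pvCells board).foldl (fun st t => step st t.1 t.2.1 t.2.2) st := by
  simp [pvCells, pvFoldl_flatMap, List.foldl_map]

lemma pvFold_field (step : PvSt → Int × Int × String → PvSt) (f : PvSt → List (Int × Int)) (c : String)
    (h : ∀ st t, f (step st t) = f st ++ (if t.2.2 = c then [(t.1, t.2.1)] else []))
    (l : List (Int × Int × String)) (st : PvSt) :
    f (l.foldl step st) = f st ++ l.filterMap (fun t => if t.2.2 = c then some (t.1, t.2.1) else none) := by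
  induction l generalizing st with
  | nil => simp
  | cons t l ih =>
    simp only [List.foldl_cons, ih, h, List.filterMap_cons]
    split <;> simp

-- the update a single field receives from one cell
def pvUpd (sq : String) (i j : Int) (c : String) (l : List (Int × Int)) : List (Int × Int) :=
  if sq = c then l ++ [(i, j)] else l

lemma pvStepW_eq (st : PvSt) (i j : Int) (sq : String) :
    pvStepW st i j sq =
      ⟨pvUpd sq i j "R" st.rook, pvUpd sq i j "B" st.bishops, pvUpd sq i j "N" st.knights, pvUpd sq i j "Q" st.queen, pvUpd sq i j "K" st.king, pvUpd sq i j "P" st.pawns, pvUpd sq i j "p" st.opawns, pvUpd sq i j "k" st.oking, pvUpd sq i j "b" st.obishops, pvUpd sq i j "n" st.oknights, pvUpd sq i j "q" st.oqueen, pvUpd sq i j "r" st.orooks⟩ := by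
  by_cases h1 : sq = "R"
  · simp [pvStepW, pvUpd, h1]
  by_cases h2 : sq = "B"
  · simp [pvStepW, pvUpd, h2]
  by_cases h3 : sq = "N"
  · simp [pvStepW, pvUpd, h3]
  by_cases h4 : sq = "Q"
  · simp [pvStepW, pvUpd, h4]
  by_cases h5 : sq = "K"
  · simp [pvStepW, pvUpd, h5]
  by_cases h6 : sq = "P"
  · simp [pvStepW, pvUpd, h6]
  by_cases h7 : sq = "p"
  · simp [pvStepW, pvUpd, h7]
  by_cases h8 : sq = "k"
  · simp [pvStepW, pvUpd, h8]
  by_cases h9 : sq = "b"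
  · simp [pvStepW, pvUpd, h9]
  by_cases h10 : sq = "n"
  · simp [pvStepW, pvUpd, h10]
  by_cases h11 : sq = "q"
  · simp [pvStepW, pvUpd, h11]
  by_cases h12 : sq = "r"
  · simp [pvStepW, pvUpd, h12]
  simp [pvStepW, pvUpd, h1, h2, h3, h4, h5, h6, h7, h8, h9, h10, h11, h12]

lemma pvStepB_eq (st : PvSt) (i j : Int) (sq : String) :
    pvStepB st i j sq =
      ⟨pvUpd sq i j "r" st.rook, pvUpd sq i j "b" st.bishops, pvUpd sq i j "n" st.knights, pvUpd sq i j "q" st.queen, pvUpd sq i j "k" st.king, pvUpd sq i j "p" st.pawns, pvUpd sq i j "P" st.opawns, pvUpd sq i j "K" st.oking, pvUpd sq i j "B" st.obishops, pvUpd sq i j "N" st.oknights, pvUpd sq i j "Q" st.oqueen, pvUpd sq i j "R" st.orooks⟩ := by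
  by_cases h1 : sq = "r"
  · simp [pvStepB, pvUpd, h1]
  by_cases h2 : sq = "b"
  · simp [pvStepB, pvUpd, h2]
  by_cases h3 : sq = "n"
  · simp [pvStepB, pvUpd, h3]
  by_cases h4 : sq = "q"
  · simp [pvStepB, pvUpd, h4]
  by_cases h5 : sq = "k"
  · simp [pvStepB, pvUpd, h5]
  by_cases h6 : sq = "p"
  · simp [pvStepB, pvUpd, h6]
  by_cases h7 : sq = "P"
  · simp [pvStepB, pvUpd, h7]
  by_cases h8 : sq = "K"
  · simp [pvStepB, pvUpd, h8]
  by_cases h9 : sq = "B"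
  · simp [pvStepB, pvUpd, h9]
  by_cases h10 : sq = "N"
  · simp [pvStepB, pvUpd, h10]
  by_cases h11 : sq = "Q"
  · simp [pvStepB, pvUpd, h11]
  by_cases h12 : sq = "R"
  · simp [pvStepB, pvUpd, h12]
  simp [pvStepB, pvUpd, h1, h2, h3, h4, h5, h6, h7, h8, h9, h10, h11, h12]

lemma pvStepW_rook (st : PvSt) (t : Int × Int × String) :
    (pvStepW st t.1 t.2.1 t.2.2).rook = st.rook ++ (if t.2.2 = "R" then [(t.1, t.2.1)] else []) := by
  simp only [pvStepW_eq, pvUpd]; split <;> simp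

lemma pvStepW_bishops (st : PvSt) (t : Int × Int × String) :
    (pvStepW st t.1 t.2.1 t.2.2).bishops = st.bishops ++ (if t.2.2 = "B" then [(t.1, t.2.1)] else []) := by
  simp only [pvStepW_eq, pvUpd]; split <;> simp

lemma pvStepW_knights (st : PvSt) (t : Int × Int × String) :
    (pvStepW st t.1 t.2.1 t.2.2).knights = st.knights ++ (if t.2.2 = "N" then [(t.1, t.2.1)] else []) := by
  simp only [pvStepW_eq, pvUpd]; split <;> simp

lemma pvStepW_queen (st : PvSt) (t : Int × Int × String) :
    (pvStepW st t.1 t.2.1 t.2.2).queen = st.queen ++ (if t.2.2 = "Q" then [(t.1, t.2.1)] else []) := by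
  simp only [pvStepW_eq, pvUpd]; split <;> simp

lemma pvStepW_king (st : PvSt) (t : Int × Int × String) :
    (pvStepW st t.1 t.2.1 t.2.2).king = st.king ++ (if t.2.2 = "K" then [(t.1, t.2.1)] else []) := by
  simp only [pvStepW_eq, pvUpd]; split <;> simp

lemma pvStepW_pawns (st : PvSt) (t : Int × Int × String) :
    (pvStepW st t.1 t.2.1 t.2.2).pawns = st.pawns ++ (if t.2.2 = "P" then [(t.1, t.2.1)] else []) := by
  simp only [pvStepW_eq, pvUpd]; split <;> simp

lemma pvStepW_opawns (st : PvSt) (t : Int × Int × String) :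
    (pvStepW st t.1 t.2.1 t.2.2).opawns = st.opawns ++ (if t.2.2 = "p" then [(t.1, t.2.1)] else []) := by
  simp only [pvStepW_eq, pvUpd]; split <;> simp

lemma pvStepW_oking (st : PvSt) (t : Int × Int × String) :
    (pvStepW st t.1 t.2.1 t.2.2).oking = st.oking ++ (if t.2.2 = "k" then [(t.1, t.2.1)] else []) := by
  simp only [pvStepW_eq, pvUpd]; split <;> simp

lemma pvStepW_obishops (st : PvSt) (t : Int × Int × String) :
    (pvStepW st t.1 t.2.1 t.2.2).obishops = st.obishops ++ (if t.2.2 = "b" then [(t.1, t.2.1)] else []) := by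
  simp only [pvStepW_eq, pvUpd]; split <;> simp

lemma pvStepW_oknights (st : PvSt) (t : Int × Int × String) :
    (pvStepW st t.1 t.2.1 t.2.2).oknights = st.oknights ++ (if t.2.2 = "n" then [(t.1, t.2.1)] else []) := by
  simp only [pvStepW_eq, pvUpd]; split <;> simp

lemma pvStepW_oqueen (st : PvSt) (t : Int × Int × String) :
    (pvStepW st t.1 t.2.1 t.2.2).oqueen = st.oqueen ++ (if t.2.2 = "q" then [(t.1, t.2.1)] else []) := by
  simp only [pvStepW_eq, pvUpd]; split <;> simp

lemma pvStepW_orooks (st : PvSt) (t : Int × Int × String) :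
    (pvStepW st t.1 t.2.1 t.2.2).orooks = st.orooks ++ (if t.2.2 = "r" then [(t.1, t.2.1)] else []) := by
  simp only [pvStepW_eq, pvUpd]; split <;> simp

lemma pvStepB_rook (st : PvSt) (t : Int × Int × String) :
    (pvStepB st t.1 t.2.1 t.2.2).rook = st.rook ++ (if t.2.2 = "r" then [(t.1, t.2.1)] else []) := by
  simp only [pvStepB_eq, pvUpd]; split <;> simp

lemma pvStepB_bishops (st : PvSt) (t : Int × Int × String) :
    (pvStepB st t.1 t.2.1 t.2.2).bishops = st.bishops ++ (if t.2.2 = "b" then [(t.1, t.2.1)] else []) := by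
  simp only [pvStepB_eq, pvUpd]; split <;> simp

lemma pvStepB_knights (st : PvSt) (t : Int × Int × String) :
    (pvStepB st t.1 t.2.1 t.2.2).knights = st.knights ++ (if t.2.2 = "n" then [(t.1, t.2.1)] else []) := by
  simp only [pvStepB_eq, pvUpd]; split <;> simp

lemma pvStepB_queen (st : PvSt) (t : Int × Int × String) :
    (pvStepB st t.1 t.2.1 t.2.2).queen = st.queen ++ (if t.2.2 = "q" then [(t.1, t.2.1)] else []) := by
  simp only [pvStepB_eq, pvUpd]; split <;> simp

lemma pvStepB_king (st : PvSt) (t : Int × Int × String) :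
    (pvStepB st t.1 t.2.1 t.2.2).king = st.king ++ (if t.2.2 = "k" then [(t.1, t.2.1)] else []) := by
  simp only [pvStepB_eq, pvUpd]; split <;> simp

lemma pvStepB_pawns (st : PvSt) (t : Int × Int × String) :
    (pvStepB st t.1 t.2.1 t.2.2).pawns = st.pawns ++ (if t.2.2 = "p" then [(t.1, t.2.1)] else []) := by
  simp only [pvStepB_eq, pvUpd]; split <;> simp

lemma pvStepB_opawns (st : PvSt) (t : Int × Int × String) :
    (pvStepB st t.1 t.2.1 t.2.2).opawns = st.opawns ++ (if t.2.2 = "P" then [(t.1, t.2.1)] else []) := by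
  simp only [pvStepB_eq, pvUpd]; split <;> simp

lemma pvStepB_oking (st : PvSt) (t : Int × Int × String) :
    (pvStepB st t.1 t.2.1 t.2.2).oking = st.oking ++ (if t.2.2 = "K" then [(t.1, t.2.1)] else []) := by
  simp only [pvStepB_eq, pvUpd]; split <;> simp

lemma pvStepB_obishops (st : PvSt) (t : Int × Int × String) :
    (pvStepB st t.1 t.2.1 t.2.2).obishops = st.obishops ++ (if t.2.2 = "B" then [(t.1, t.2.1)] else []) := by
  simp only [pvStepB_eq, pvUpd]; split <;> simp

lemma pvStepB_oknights (st : PvSt) (t : Int × Int × String) :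
    (pvStepB st t.1 t.2.1 t.2.2).oknights = st.oknights ++ (if t.2.2 = "N" then [(t.1, t.2.1)] else []) := by
  simp only [pvStepB_eq, pvUpd]; split <;> simp

lemma pvStepB_oqueen (st : PvSt) (t : Int × Int × String) :
    (pvStepB st t.1 t.2.1 t.2.2).oqueen = st.oqueen ++ (if t.2.2 = "Q" then [(t.1, t.2.1)] else []) := by
  simp only [pvStepB_eq, pvUpd]; split <;> simp

lemma pvStepB_orooks (st : PvSt) (t : Int × Int × String) :
    (pvStepB st t.1 t.2.1 t.2.2).orooks = st.orooks ++ (if t.2.2 = "R" then [(t.1, t.2.1)] else []) := by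
  simp only [pvStepB_eq, pvUpd]; split <;> simp

-- ===== VERDICT (by name: the statement is the Claim_ definition above) =====
theorem find_positions_array_spec : Claim_equal_find_positions_array := by
  intro board players_turn _
  unfold Spec_find_positions_array find_positions_array find_positions_array_alt
  by_cases hw : players_turn = "w" <;>
    simp only [hw, ite_true, ite_false, List.map_cons, List.map_nil] <;>
    rw [pvNested_eq_cells] <;>
    simp only [pvCollect_eq_cells, List.cons.injEq, and_true]
  · refine ⟨?_, ?_, ?_, ?_, ?_, ?_, ?_, ?_, ?_, ?_, ?_, ?_⟩
    · exact (pvFold_field _ (fun s => s.rook) "R" (pvStepW_rook) (pvCells board) pvInit).trans (by simp [pvInit])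
    · exact (pvFold_field _ (fun s => s.bishops) "B" (pvStepW_bishops) (pvCells board) pvInit).trans (by simp [pvInit])
    · exact (pvFold_field _ (fun s => s.knights) "N" (pvStepW_knights) (pvCells board) pvInit).trans (by simp [pvInit])
    · exact (pvFold_field _ (fun s => s.queen) "Q" (pvStepW_queen) (pvCells board) pvInit).trans (by simp [pvInit])
    · exact (pvFold_field _ (fun s => s.king) "K" (pvStepW_king) (pvCells board) pvInit).trans (by simp [pvInit])
    · exact (pvFold_field _ (fun s => s.pawns) "P" (pvStepW_pawns) (pvCells board) pvInit).trans (by simp [pvInit])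
    · exact (pvFold_field _ (fun s => s.opawns) "p" (pvStepW_opawns) (pvCells board) pvInit).trans (by simp [pvInit])
    · exact (pvFold_field _ (fun s => s.oking) "k" (pvStepW_oking) (pvCells board) pvInit).trans (by simp [pvInit])
    · exact (pvFold_field _ (fun s => s.obishops) "b" (pvStepW_obishops) (pvCells board) pvInit).trans (by simp [pvInit])
    · exact (pvFold_field _ (fun s => s.oknights) "n" (pvStepW_oknights) (pvCells board) pvInit).trans (by simp [pvInit])
    · exact (pvFold_field _ (fun s => s.oqueen) "q" (pvStepW_oqueen) (pvCells board) pvInit).trans (by simp [pvInit])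
    · exact (pvFold_field _ (fun s => s.orooks) "r" (pvStepW_orooks) (pvCells board) pvInit).trans (by simp [pvInit])
  · refine ⟨?_, ?_, ?_, ?_, ?_, ?_, ?_, ?_, ?_, ?_, ?_, ?_⟩
    · exact (pvFold_field _ (fun s => s.rook) "r" (pvStepB_rook) (pvCells board) pvInit).trans (by simp [pvInit])
    · exact (pvFold_field _ (fun s => s.bishops) "b" (pvStepB_bishops) (pvCells board) pvInit).trans (by simp [pvInit])
    · exact (pvFold_field _ (fun s => s.knights) "n" (pvStepB_knights) (pvCells board) pvInit).trans (by simp [pvInit])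
    · exact (pvFold_field _ (fun s => s.queen) "q" (pvStepB_queen) (pvCells board) pvInit).trans (by simp [pvInit])
    · exact (pvFold_field _ (fun s => s.king) "k" (pvStepB_king) (pvCells board) pvInit).trans (by simp [pvInit])
    · exact (pvFold_field _ (fun s => s.pawns) "p" (pvStepB_pawns) (pvCells board) pvInit).trans (by simp [pvInit])
    · exact (pvFold_field _ (fun s => s.opawns) "P" (pvStepB_opawns) (pvCells board) pvInit).trans (by simp [pvInit])
    · exact (pvFold_field _ (fun s => s.oking) "K" (pvStepB_oking) (pvCells board) pvInit).trans (by simp [pvInit])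
    · exact (pvFold_field _ (fun s => s.obishops) "B" (pvStepB_obishops) (pvCells board) pvInit).trans (by simp [pvInit])
    · exact (pvFold_field _ (fun s => s.oknights) "N" (pvStepB_oknights) (pvCells board) pvInit).trans (by simp [pvInit])
    · exact (pvFold_field _ (fun s => s.oqueen) "Q" (pvStepB_oqueen) (pvCells board) pvInit).trans (by simp [pvInit])
    · exact (pvFold_field _ (fun s => s.orooks) "R" (pvStepB_orooks) (pvCells board) pvInit).trans (by simp [pvInit])
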